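-- pv_equiv track=rewrite | github.com/thuzax/vrp-solver | src/solution_methods/exact_methods/SetPartitionModel.py | get_request_in_route_dict
-- ===== SOURCE A (Python) =====
-- def get_request_in_route_dict(requests, routes_pool):
--     request_in_route = {}
--     for request in requests:
--         request_in_route[request] = {}
--         request_has_at_least_one_route = False
--         for pos, route in enumerate(routes_pool):
--             if (request in route):
--                 request_in_route[request][pos] = 1
--                 request_has_at_least_one_route = True
--             else:
--                 request_in_route[request][pos] = 0
--
--         if (not request_has_at_least_one_route):
--             request_in_route.pop(request)
--
--
--     return request_in_route
-- ===== SOURCE B (Python) =====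
-- def get_request_in_route_dict(requests, routes_pool):
--     n = len(routes_pool)
--     request_in_route = {request: {pos: 0 for pos in range(n)} for request in requests}
--     covered = set()
--     for pos, route in enumerate(routes_pool):
--         for request in route:
--             if request in request_in_route:
--                 request_in_route[request][pos] = 1
--                 covered.add(request)
--     for request in requests:
--         if request not in covered:
--             request_in_route.pop(request, None)
--     return request_in_route
-- ===== Notes on version B (the rewrite author's own statement) =====
-- stated objective: faster
-- what changed: A scans every route once per request (nested membership tests); B pre-builds zeroed flag rows for all requests in one dict comprehension, then makes a single scatter pass over the route contents setting flags and recording covered requests, and finally pops uncovered requests.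
import Mathlib
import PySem

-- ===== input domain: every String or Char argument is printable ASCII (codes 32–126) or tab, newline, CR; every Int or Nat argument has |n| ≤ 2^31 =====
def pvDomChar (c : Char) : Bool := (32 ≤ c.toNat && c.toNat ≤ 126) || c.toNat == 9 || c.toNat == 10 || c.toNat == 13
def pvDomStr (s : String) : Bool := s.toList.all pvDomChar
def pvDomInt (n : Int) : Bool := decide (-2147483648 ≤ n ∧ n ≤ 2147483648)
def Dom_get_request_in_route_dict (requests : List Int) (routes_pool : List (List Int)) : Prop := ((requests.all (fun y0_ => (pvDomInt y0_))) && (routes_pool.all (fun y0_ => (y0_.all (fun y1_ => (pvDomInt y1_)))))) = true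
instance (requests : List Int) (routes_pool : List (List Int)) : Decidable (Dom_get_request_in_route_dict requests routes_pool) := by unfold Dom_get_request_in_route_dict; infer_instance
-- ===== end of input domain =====

-- B replaces A's per-request scan over every route by one zero-initialising pass and one
-- scatter pass over the route contents (objective: faster, fewer membership scans).

-- ===== PORT A =====
-- For each request, A scans every route; the fresh inner dict request_in_route[request] = {}
-- that Python mutates in place is modelled as the local fold state st.1, written back below.
def get_request_in_route_dict (requests : List Int) (routes_pool : List (List Int)) : List (Int × List (Int × Int)) :=
  (requests.foldl
    (fun (request_in_route : PySem.Dict Int (PySem.Dict Int Int)) request =>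
      let request_in_route := request_in_route.insert request PySem.Dict.empty
      let st := (PySem.List.enumerate routes_pool).foldl
        (fun (st : PySem.Dict Int Int × Bool) (pr : Int × List Int) =>
          if request ∈ pr.2 then (st.1.insert pr.1 1, true)
          else (st.1.insert pr.1 0, st.2))
        (PySem.Dict.empty, false)
      let request_in_route := request_in_route.insert request st.1
      if !st.2 then request_in_route.erase request else request_in_route)
    PySem.Dict.empty).items.map (fun p => (p.1, p.2.items))

-- ===== PORT B =====
-- zero rows for every request, one scatter pass over the routes, then pop uncovered requests.
def get_request_in_route_dict_alt (requests : List Int) (routes_pool : List (List Int)) : List (Int × List (Int × Int)) :=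
  let n : Int := routes_pool.length
  let zeroRow : PySem.Dict Int Int :=
    (PySem.List.pyRange 0 n 1).foldl (fun inn pos => inn.insert pos 0) PySem.Dict.empty
  let request_in_route : PySem.Dict Int (PySem.Dict Int Int) :=
    requests.foldl (fun d request => d.insert request zeroRow) PySem.Dict.empty
  let st := (PySem.List.enumerate routes_pool).foldl
    (fun (st : PySem.Dict Int (PySem.Dict Int Int) × PySem.Set Int) (pr : Int × List Int) =>
      pr.2.foldl
        (fun (st : PySem.Dict Int (PySem.Dict Int Int) × PySem.Set Int) request =>
          if st.1.contains request then
            (st.1.insert request ((st.1.getD request PySem.Dict.empty).insert pr.1 1),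
             PySem.Set.add st.2 request)
          else st)
        st)
    (request_in_route, PySem.Set.empty)
  (requests.foldl
    (fun (d : PySem.Dict Int (PySem.Dict Int Int)) request =>
      if st.2.contains request then d else d.erase request)
    st.1).items.map (fun p => (p.1, p.2.items))

-- ===== PRECONDITION & SPEC =====
def Spec_get_request_in_route_dict (requests : List Int) (routes_pool : List (List Int)) (out : List (Int × List (Int × Int))) : Prop := out = get_request_in_route_dict_alt requests routes_pool
instance (requests : List Int) (routes_pool : List (List Int)) (out : List (Int × List (Int × Int))) : Decidable (Spec_get_request_in_route_dict requests routes_pool out) := by unfold Spec_get_request_in_route_dict; infer_instance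

-- ===== CLAIM (what is proved, stated in full; the proofs are below) =====
def Claim_equal_get_request_in_route_dict : Prop := ∀ (requests : List Int) (routes_pool : List (List Int)), Dom_get_request_in_route_dict requests routes_pool → Spec_get_request_in_route_dict requests routes_pool (get_request_in_route_dict requests routes_pool)

-- ===== LEMMAS AND PROOFS =====

def pvMk (S : List Int) (G : Int → PySem.Dict Int Int) : PySem.Dict Int (PySem.Dict Int Int) :=
  ⟨S.map (fun x => (x, G x))⟩

theorem pvMk_contains (S : List Int) (G : Int → PySem.Dict Int Int) (q : Int) :
    (pvMk S G).contains q = decide (q ∈ S) := by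
  by_cases h : q ∈ S <;> simp [pvMk, PySem.Dict.contains, List.any_map, h, Function.comp]
  · exact fun x hx => fun e => h (e ▸ hx)

theorem pvMk_getD (S : List Int) (G : Int → PySem.Dict Int Int) (q : Int)
    (hS : S.Nodup) (hq : q ∈ S) (d0 : PySem.Dict Int Int) :
    (pvMk S G).getD q d0 = G q := by
  apply PySem.Dict.getD_of_mem_items
  · exact List.mem_map.2 ⟨q, hq, rfl⟩
  · show (List.map _ (S.map _)).Nodup
    rw [List.map_map]
    have h2 : (List.map ((fun x => x.1) ∘ fun x => (x, G x)) S) = S :=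
      List.map_id'' (fun x => rfl) S
    rw [h2]; exact hS

theorem pvMk_insert_mem (S : List Int) (G : Int → PySem.Dict Int Int) (q : Int)
    (hq : q ∈ S) (v : PySem.Dict Int Int) :
    (pvMk S G).insert q v = pvMk S (fun x => if x = q then v else G x) := by
  have hc : (pvMk S G).contains q = true := by simp [pvMk_contains, hq]
  apply PySem.Dict.ext
  rw [PySem.Dict.items_insert_of_contains _ _ hc]
  show List.map _ (S.map _) = S.map _
  rw [List.map_map]
  apply List.map_congr_left
  intro x hx
  by_cases hxq : x = q <;> simp [Function.comp, hxq]

theorem pvMk_insert_not_mem (S : List Int) (G : Int → PySem.Dict Int Int) (q : Int)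
    (hq : q ∉ S) (v : PySem.Dict Int Int) :
    (pvMk S G).insert q v = ⟨S.map (fun x => (x, G x)) ++ [(q, v)]⟩ := by
  have hc : (pvMk S G).contains q = false := by simp [pvMk_contains, hq]
  apply PySem.Dict.ext
  rw [PySem.Dict.items_insert_of_not_contains _ _ hc]
  rfl

theorem pvMk_erase (S : List Int) (G : Int → PySem.Dict Int Int) (r : Int) :
    (pvMk S G).erase r = pvMk (S.filter (fun x => !(x == r))) G := by
  apply PySem.Dict.ext
  show List.filter _ (S.map _) = (S.filter _).map _
  rw [List.filter_map]
  rfl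

def pvRow (routes_pool : List (List Int)) (r : Int) : PySem.Dict Int Int :=
  ⟨(PySem.List.enumerate routes_pool).map (fun pr => (pr.1, if r ∈ pr.2 then (1:Int) else 0))⟩

def pvCov (routes_pool : List (List Int)) (r : Int) : Bool :=
  routes_pool.any (fun route => decide (r ∈ route))

theorem pvMk_congr (S : List Int) (G G' : Int → PySem.Dict Int Int)
    (h : ∀ x ∈ S, G x = G' x) : pvMk S G = pvMk S G' := by
  apply PySem.Dict.ext
  exact List.map_congr_left (fun x hx => by rw [h x hx])

theorem pv_add_mem (S : List Int) (r : Int) (h : r ∈ S) : PySem.Set.add S r = S := by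
  simp [PySem.Set.add, h]

theorem pv_add_not_mem (S : List Int) (r : Int) (h : r ∉ S) : PySem.Set.add S r = S ++ [r] := by
  simp [PySem.Set.add, h]

-- A's inner loop over enumerate(routes_pool): dict fold plus the covered flag
theorem pv_innerA (r : Int) (rs : List (List Int)) : ∀ (s : Int) (inner0 : PySem.Dict Int Int) (b0 : Bool),
    (PySem.List.enumerate rs s).foldl
      (fun (st : PySem.Dict Int Int × Bool) (pr : Int × List Int) =>
        if r ∈ pr.2 then (st.1.insert pr.1 1, true)
        else (st.1.insert pr.1 0, st.2))
      (inner0, b0)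
    = ((PySem.List.enumerate rs s).foldl
         (fun inn pr => inn.insert pr.1 (if r ∈ pr.2 then 1 else 0)) inner0,
       b0 || rs.any (fun route => decide (r ∈ route))) := by
  induction rs with
  | nil => intro s inner0 b0; simp [PySem.List.enumerate]
  | cons route rest ih =>
    intro s inner0 b0
    rw [PySem.List.enumerate_cons]
    by_cases h : r ∈ route <;> simp [h, ih]

theorem pv_rowfold_empty (r : Int) (rs : List (List Int)) (s : Int) :
    (PySem.List.enumerate rs s).foldl
      (fun inn pr => inn.insert pr.1 (if r ∈ pr.2 then (1:Int) else 0)) PySem.Dict.empty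
    = ⟨(PySem.List.enumerate rs s).map (fun pr => (pr.1, if r ∈ pr.2 then (1:Int) else 0))⟩ := by
  apply PySem.Dict.ext
  rw [PySem.Dict.items_foldl_insert_fresh (PySem.List.enumerate rs s)
        (fun pr => pr.1) (fun pr => if r ∈ pr.2 then (1:Int) else 0) PySem.Dict.empty
        (fun a _ => by simp [PySem.Dict.empty, PySem.Dict.contains])
        (by rw [PySem.List.map_fst_enumerate]; exact PySem.List.nodup_pyRange_one _ _)]
  simp [PySem.Dict.empty]

-- one step of A's outer loop on the canonical dict shape
theorem pv_stepA (routes_pool : List (List Int)) (S : List Int) (r : Int) :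
    (let request_in_route := (pvMk (S.filter (pvCov routes_pool)) (pvRow routes_pool)).insert r PySem.Dict.empty
     let st := (PySem.List.enumerate routes_pool).foldl
        (fun (st : PySem.Dict Int Int × Bool) (pr : Int × List Int) =>
          if r ∈ pr.2 then (st.1.insert pr.1 1, true)
          else (st.1.insert pr.1 0, st.2))
        (PySem.Dict.empty, false)
     let request_in_route := request_in_route.insert r st.1
     if !st.2 then request_in_route.erase r else request_in_route)
    = pvMk ((PySem.Set.add S r).filter (pvCov routes_pool)) (pvRow routes_pool) := by
  simp only [pv_innerA, pv_rowfold_empty, Bool.false_or]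
  rw [PySem.Dict.insert_insert_self]
  have hrow : (⟨(PySem.List.enumerate routes_pool).map
      (fun pr => (pr.1, if r ∈ pr.2 then (1:Int) else 0))⟩ : PySem.Dict Int Int) = pvRow routes_pool r := rfl
  rw [hrow]
  by_cases hc : pvCov routes_pool r
  · rw [show (routes_pool.any (fun route => decide (r ∈ route))) = true from hc]
    simp only [Bool.not_true, Bool.false_eq_true, if_false]
    by_cases hr : r ∈ S
    · have hm : r ∈ S.filter (pvCov routes_pool) := List.mem_filter.2 ⟨hr, hc⟩
      rw [pvMk_insert_mem _ _ _ hm]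
      rw [pv_add_mem _ _ hr]
      exact pvMk_congr _ _ _ (fun x _ => by by_cases hxr : x = r <;> simp [hxr])
    · have hm : r ∉ S.filter (pvCov routes_pool) := fun h => hr (List.mem_filter.1 h).1
      rw [pvMk_insert_not_mem _ _ _ hm]
      rw [pv_add_not_mem _ _ hr]
      apply PySem.Dict.ext
      show _ ++ _ = List.map _ _
      rw [List.filter_append, List.map_append]
      have h3 : List.filter (pvCov routes_pool) [r] = [r] := by
        simp [List.filter, hc]
      rw [h3]
      rfl
  · rw [show (routes_pool.any (fun route => decide (r ∈ route))) = false from eq_false_of_ne_true hc]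
    simp only [Bool.not_false, if_true]
    have hm : r ∉ S.filter (pvCov routes_pool) := fun h => hc ((List.mem_filter.1 h).2)
    rw [pvMk_insert_not_mem _ _ _ hm]
    have herase : (⟨(S.filter (pvCov routes_pool)).map (fun x => (x, pvRow routes_pool x)) ++
        [(r, pvRow routes_pool r)]⟩ : PySem.Dict Int (PySem.Dict Int Int)).erase r
        = pvMk (S.filter (pvCov routes_pool)) (pvRow routes_pool) := by
      apply PySem.Dict.ext
      show List.filter _ (_ ++ _) = _
      rw [List.filter_append]
      have h1 : List.filter (fun p => !p.1 == r) [((r : Int), pvRow routes_pool r)] = [] := by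
        simp [List.filter]
      rw [h1, List.append_nil]
      rw [List.filter_map]
      have h2 : (S.filter (pvCov routes_pool)).filter
          ((fun (p : Int × PySem.Dict Int Int) => !p.1 == r) ∘ (fun x => (x, pvRow routes_pool x)))
          = S.filter (pvCov routes_pool) := by
        apply List.filter_eq_self.2
        intro x hx
        have : pvCov routes_pool x = true := (List.mem_filter.1 hx).2
        have hne : x ≠ r := fun e => hc (e ▸ this)
        simp [Function.comp, hne]
      rw [h2]
      rfl
    rw [herase]
    congr 1
    by_cases hr : r ∈ S
    · rw [pv_add_mem _ _ hr]
    · rw [pv_add_not_mem _ _ hr, List.filter_append]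
      have : List.filter (pvCov routes_pool) [r] = [] := by
        simp [List.filter, eq_false_of_ne_true hc]
      rw [this, List.append_nil]

theorem pv_foldA (routes_pool : List (List Int)) (requests : List Int) : ∀ S : List Int,
    requests.foldl
      (fun (request_in_route : PySem.Dict Int (PySem.Dict Int Int)) request =>
        let request_in_route := request_in_route.insert request PySem.Dict.empty
        let st := (PySem.List.enumerate routes_pool).foldl
          (fun (st : PySem.Dict Int Int × Bool) (pr : Int × List Int) =>
            if request ∈ pr.2 then (st.1.insert pr.1 1, true)
            else (st.1.insert pr.1 0, st.2))
          (PySem.Dict.empty, false)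
        let request_in_route := request_in_route.insert request st.1
        if !st.2 then request_in_route.erase request else request_in_route)
      (pvMk (S.filter (pvCov routes_pool)) (pvRow routes_pool))
    = pvMk ((requests.foldl PySem.Set.add S).filter (pvCov routes_pool)) (pvRow routes_pool) := by
  induction requests with
  | nil => intro S; rfl
  | cons r rest ih =>
    intro S
    rw [List.foldl_cons]
    rw [pv_stepA routes_pool S r]
    exact ih (PySem.Set.add S r)

-- B's zero-initialising pass
theorem pv_foldZero (c : PySem.Dict Int Int) (requests : List Int) : ∀ S : List Int,
    requests.foldl (fun d request => d.insert request c) (pvMk S (fun _ => c))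
    = pvMk (requests.foldl PySem.Set.add S) (fun _ => c) := by
  induction requests with
  | nil => intro S; rfl
  | cons r rest ih =>
    intro S
    rw [List.foldl_cons, List.foldl_cons]
    by_cases hr : r ∈ S
    · rw [pvMk_insert_mem _ _ _ hr, pv_add_mem _ _ hr]
      rw [pvMk_congr S _ (fun _ => c) (fun x _ => by by_cases hxr : x = r <;> simp [hxr])]
      exact ih S
    · rw [pvMk_insert_not_mem _ _ _ hr, pv_add_not_mem _ _ hr]
      have : (⟨S.map (fun x => (x, c)) ++ [(r, c)]⟩ : PySem.Dict Int (PySem.Dict Int Int))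
          = pvMk (S ++ [r]) (fun _ => c) := by
        apply PySem.Dict.ext
        simp [pvMk]
      rw [this]
      exact ih (S ++ [r])

-- B's inner scatter loop over one route at position p
theorem pv_scatterRoute (p : Int) (route : List Int) : ∀ (S : List Int), S.Nodup →
    ∀ (G : Int → PySem.Dict Int Int) (C : PySem.Set Int),
    route.foldl
      (fun (st : PySem.Dict Int (PySem.Dict Int Int) × PySem.Set Int) request =>
        if st.1.contains request then
          (st.1.insert request ((st.1.getD request PySem.Dict.empty).insert p 1),
           PySem.Set.add st.2 request)
        else st)
      (pvMk S G, C)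
    = (pvMk S (fun x => if x ∈ route then (G x).insert p 1 else G x),
       route.foldl (fun C req => if req ∈ S then PySem.Set.add C req else C) C) := by
  induction route with
  | nil =>
    intro S hS G C
    simp only [List.foldl_nil]
    refine Prod.ext ?_ rfl
    exact (pvMk_congr _ _ _ (fun x _ => by simp)).symm
  | cons q rest ih =>
    intro S hS G C
    rw [List.foldl_cons, List.foldl_cons]
    by_cases hq : q ∈ S
    · rw [if_pos (by rw [pvMk_contains]; simpa using hq), if_pos hq]
      rw [pvMk_getD _ _ _ hS hq, pvMk_insert_mem _ _ _ hq]
      rw [ih S hS _ (PySem.Set.add C q)]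
      refine Prod.ext ?_ rfl
      apply pvMk_congr
      intro x _
      by_cases hxq : x = q
      · subst hxq
        by_cases hxr : x ∈ rest <;> simp [hxr, PySem.Dict.insert_insert_self]
      · have : (x ∈ q :: rest) ↔ (x ∈ rest) := by simp [hxq]
        by_cases hxr : x ∈ rest <;> simp [hxq, hxr, this]
    · rw [if_neg (by rw [pvMk_contains]; simpa using hq), if_neg hq]
      rw [ih S hS G C]
      refine Prod.ext ?_ rfl
      apply pvMk_congr
      intro x hx
      have hxq : x ≠ q := fun e => hq (e ▸ hx)
      simp [hxq]

-- B's full scatter pass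
theorem pv_scatterAll (rs : List (List Int)) : ∀ (s : Int) (S : List Int), S.Nodup →
    ∀ (G : Int → PySem.Dict Int Int) (C : PySem.Set Int),
    (PySem.List.enumerate rs s).foldl
      (fun (st : PySem.Dict Int (PySem.Dict Int Int) × PySem.Set Int) (pr : Int × List Int) =>
        pr.2.foldl
          (fun (st : PySem.Dict Int (PySem.Dict Int Int) × PySem.Set Int) request =>
            if st.1.contains request then
              (st.1.insert request ((st.1.getD request PySem.Dict.empty).insert pr.1 1),
               PySem.Set.add st.2 request)
            else st)
          st)
      (pvMk S G, C)
    = (pvMk S (fun x => (PySem.List.enumerate rs s).foldl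
          (fun inn pr => if x ∈ pr.2 then inn.insert pr.1 1 else inn) (G x)),
       (PySem.List.enumerate rs s).foldl
         (fun C pr => pr.2.foldl (fun C req => if req ∈ S then PySem.Set.add C req else C) C) C) := by
  induction rs with
  | nil =>
    intro s S hS G C
    simp [PySem.List.enumerate]
  | cons route rest ih =>
    intro s S hS G C
    rw [PySem.List.enumerate_cons]
    simp only [List.foldl_cons]
    rw [pv_scatterRoute s route S hS G C]
    rw [ih (s+1) S hS _ _]

-- membership in the covered set accumulated over one route
theorem pv_covRoute (route : List Int) (S : List Int) : ∀ (C : PySem.Set Int) (x : Int),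
    x ∈ route.foldl (fun C req => if req ∈ S then PySem.Set.add C req else C) C
      ↔ x ∈ C ∨ (x ∈ route ∧ x ∈ S) := by
  induction route with
  | nil => intro C x; simp
  | cons q rest ih =>
    intro C x
    rw [List.foldl_cons]
    by_cases hq : q ∈ S
    · rw [if_pos hq, ih]
      rw [PySem.Set.mem_add]
      constructor
      · rintro ((h | h) | h)
        · exact Or.inl h
        · exact Or.inr ⟨by simp [h], by rw [h]; exact hq⟩
        · exact Or.inr ⟨by simp [h.1], h.2⟩
      · rintro (h | ⟨h1, h2⟩)
        · exact Or.inl (Or.inl h)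
        · rcases List.mem_cons.1 h1 with h | h
          · exact Or.inl (Or.inr h)
          · exact Or.inr ⟨h, h2⟩
    · rw [if_neg hq, ih]
      constructor
      · rintro (h | ⟨h1, h2⟩)
        · exact Or.inl h
        · exact Or.inr ⟨by simp [h1], h2⟩
      · rintro (h | ⟨h1, h2⟩)
        · exact Or.inl h
        · rcases List.mem_cons.1 h1 with h | h
          · exact absurd (h ▸ h2) hq
          · exact Or.inr ⟨h, h2⟩

-- membership in the covered set accumulated over all routes
theorem pv_covAll (rs : List (List Int)) (S : List Int) : ∀ (s : Int) (C : PySem.Set Int) (x : Int),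
    x ∈ (PySem.List.enumerate rs s).foldl
      (fun C pr => pr.2.foldl (fun C req => if req ∈ S then PySem.Set.add C req else C) C) C
      ↔ x ∈ C ∨ (x ∈ S ∧ rs.any (fun route => decide (x ∈ route)) = true) := by
  induction rs with
  | nil => intro s C x; simp [PySem.List.enumerate]
  | cons route rest ih =>
    intro s C x
    rw [PySem.List.enumerate_cons, List.foldl_cons, ih, pv_covRoute]
    simp only [List.any_cons, Bool.or_eq_true, decide_eq_true_eq]
    tauto

theorem pv_enumerate_fst_ge (rs : List (List Int)) : ∀ (s : Int) (p : Int × List Int),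
    p ∈ PySem.List.enumerate rs s → s ≤ p.1 := by
  induction rs with
  | nil => intro s p h; simp [PySem.List.enumerate] at h
  | cons route rest ih =>
    intro s p h
    rw [PySem.List.enumerate_cons] at h
    rcases List.mem_cons.1 h with h | h
    · rw [h]
    · exact le_trans (by omega) (ih (s+1) p h)

-- overwriting 1s into a dict that already holds the zero row, keys in order
theorem pv_rowOverwrite (x : Int) (rs : List (List Int)) : ∀ (s : Int) (pre : List (Int × Int))
    (D : PySem.Dict Int Int),
    D.items = pre ++ (PySem.List.enumerate rs s).map (fun pr => (pr.1, (0:Int))) →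
    (∀ p ∈ pre, p.1 < s) →
    ((PySem.List.enumerate rs s).foldl
      (fun inn pr => if x ∈ pr.2 then inn.insert pr.1 1 else inn) D).items
    = pre ++ (PySem.List.enumerate rs s).map (fun pr => (pr.1, if x ∈ pr.2 then (1:Int) else 0)) := by
  induction rs with
  | nil => intro s pre D hD hpre; simpa [PySem.List.enumerate] using hD
  | cons route rest ih =>
    intro s pre D hD hpre
    rw [PySem.List.enumerate_cons] at hD ⊢
    simp only [List.foldl_cons, List.map_cons]
    have hg : ∀ (v : Int), List.map (fun (p : Int × Int) => if (p.1 == s) = true then ((s:Int), (1:Int)) else p)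
        ((PySem.List.enumerate rest (s+1)).map (fun pr => (pr.1, v))) =
        (PySem.List.enumerate rest (s+1)).map (fun pr => (pr.1, v)) := by
      intro v
      rw [List.map_map]
      apply List.map_congr_left
      intro pr hpr
      have := pv_enumerate_fst_ge rest (s+1) pr hpr
      have hne : pr.1 ≠ s := by omega
      simp [hne]
    by_cases hx : x ∈ route
    · simp only [hx, if_true]
      have hc : D.contains s = true := by
        rw [PySem.Dict.contains, hD]
        simp
      have hitems : (D.insert s 1).items
          = (pre ++ [(s, (1:Int))]) ++ (PySem.List.enumerate rest (s+1)).map (fun pr => (pr.1, (0:Int))) := by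
        rw [PySem.Dict.items_insert_of_contains _ _ hc, hD]
        simp only [List.map_append, List.map_cons]
        have h1 : pre.map (fun (p : Int × Int) => if (p.1 == s) = true then ((s:Int), (1:Int)) else p) = pre := by
          calc pre.map (fun (p : Int × Int) => if (p.1 == s) = true then ((s:Int), (1:Int)) else p)
              = pre.map id := List.map_congr_left (fun p hp => by
                have := hpre p hp
                have hne : p.1 ≠ s := by omega
                simp [hne])
            _ = pre := List.map_id _
        rw [h1, hg]
        simp
      rw [ih (s+1) (pre ++ [(s, 1)]) (D.insert s 1) hitems
            (by intro p hp
                rcases List.mem_append.1 hp with h | h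
                · exact lt_trans (hpre p h) (by omega)
                · rw [List.mem_singleton] at h; subst h; dsimp only; omega)]
      simp
    · simp only [hx, if_false]
      have hD' : D.items = (pre ++ [(s, (0:Int))]) ++ (PySem.List.enumerate rest (s+1)).map (fun pr => (pr.1, (0:Int))) := by
        rw [hD]; simp
      rw [ih (s+1) (pre ++ [(s, 0)]) D hD'
            (by intro p hp
                rcases List.mem_append.1 hp with h | h
                · exact lt_trans (hpre p h) (by omega)
                · rw [List.mem_singleton] at h; subst h; dsimp only; omega)]
      simp

-- scattering 1s into the zero row gives exactly the membership row
theorem pv_rowFromZero (rs : List (List Int)) (x : Int) :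
    (PySem.List.enumerate rs 0).foldl
      (fun inn pr => if x ∈ pr.2 then inn.insert pr.1 1 else inn)
      ((PySem.List.pyRange 0 (rs.length : Int) 1).foldl
        (fun inn pos => inn.insert pos 0) PySem.Dict.empty)
    = pvRow rs x := by
  have hzero : ((PySem.List.pyRange 0 (rs.length : Int) 1).foldl
      (fun inn pos => inn.insert pos 0) PySem.Dict.empty).items
      = (PySem.List.enumerate rs 0).map (fun pr => (pr.1, (0:Int))) := by
    rw [PySem.Dict.items_foldl_insert_fresh (PySem.List.pyRange 0 (rs.length : Int) 1)
          (fun pos => pos) (fun _ => (0:Int)) PySem.Dict.empty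
          (fun a _ => by simp [PySem.Dict.empty, PySem.Dict.contains])
          (by simpa using PySem.List.nodup_pyRange_one 0 (rs.length : Int))]
    have : (PySem.List.enumerate rs 0).map (fun pr => (pr.1, (0:Int)))
        = ((PySem.List.enumerate rs 0).map (fun pr => pr.1)).map (fun p => (p, (0:Int))) := by
      rw [List.map_map]
      rfl
    rw [this, PySem.List.map_fst_enumerate]
    simp [PySem.Dict.empty]
  apply PySem.Dict.ext
  rw [pv_rowOverwrite x rs 0 []
        ((PySem.List.pyRange 0 (rs.length : Int) 1).foldl (fun inn pos => inn.insert pos 0) PySem.Dict.empty)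
        (by simpa using hzero) (by simp)]
  simp [pvRow]

-- B's final pop pass
theorem pv_foldPop (C : PySem.Set Int) (S : List Int) (G : Int → PySem.Dict Int Int) :
    ∀ (reqs : List Int) (P : Int → Bool),
    reqs.foldl (fun (d : PySem.Dict Int (PySem.Dict Int Int)) request =>
        if C.contains request then d else d.erase request)
      (pvMk (S.filter P) G)
    = pvMk (S.filter (fun x => P x && (!(decide (x ∈ reqs)) || C.contains x))) G := by
  intro reqs
  induction reqs with
  | nil =>
    intro P
    simp only [List.foldl_nil]
    congr 1
    apply List.filter_congr
    intro x _
    simp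
  | cons r rest ih =>
    intro P
    rw [List.foldl_cons]
    by_cases hc : C.contains r
    · rw [if_pos hc, ih P]
      congr 1
      apply List.filter_congr
      intro x _
      by_cases hxr : x = r
      · subst hxr
        have hm : x ∈ C := List.contains_iff_mem.1 hc
        simp [hm, List.mem_cons]
      · simp [List.mem_cons, hxr]
    · rw [if_neg hc, pvMk_erase, List.filter_filter, ih]
      congr 1
      apply List.filter_congr
      intro x _
      by_cases hxr : x = r
      · subst hxr
        have hm : x ∉ C := fun h => hc (List.contains_iff_mem.2 h)
        simp [hm, List.mem_cons]
      · have hb : (x == r) = false := by simp [hxr]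
        simp [List.mem_cons, hxr, hb]


theorem pv_foldA' (routes_pool : List (List Int)) (requests : List Int) :
    requests.foldl
      (fun (request_in_route : PySem.Dict Int (PySem.Dict Int Int)) request =>
        let request_in_route := request_in_route.insert request PySem.Dict.empty
        let st := (PySem.List.enumerate routes_pool).foldl
          (fun (st : PySem.Dict Int Int × Bool) (pr : Int × List Int) =>
            if request ∈ pr.2 then (st.1.insert pr.1 1, true)
            else (st.1.insert pr.1 0, st.2))
          (PySem.Dict.empty, false)
        let request_in_route := request_in_route.insert request st.1
        if !st.2 then request_in_route.erase request else request_in_route)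
      PySem.Dict.empty
    = pvMk ((requests.foldl PySem.Set.add []).filter (pvCov routes_pool)) (pvRow routes_pool) :=
  pv_foldA routes_pool requests []

theorem pv_foldZero' (c : PySem.Dict Int Int) (requests : List Int) :
    requests.foldl (fun d request => d.insert request c) PySem.Dict.empty
    = pvMk (requests.foldl PySem.Set.add []) (fun _ => c) :=
  pv_foldZero c requests []

theorem pv_main (requests : List Int) (routes_pool : List (List Int)) :
    get_request_in_route_dict requests routes_pool = get_request_in_route_dict_alt requests routes_pool := by
  unfold get_request_in_route_dict get_request_in_route_dict_alt
  dsimp only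
  rw [pv_foldA']
  have hS : (requests.foldl PySem.Set.add []).Nodup := PySem.Set.nodup_ofList requests
  rw [pv_foldZero', pv_scatterAll routes_pool 0 (requests.foldl PySem.Set.add []) hS
        (fun _ => (PySem.List.pyRange 0 (routes_pool.length : Int) 1).foldl
          (fun inn pos => inn.insert pos 0) PySem.Dict.empty) PySem.Set.empty]
  dsimp only
  have hrow : pvMk (requests.foldl PySem.Set.add [])
      (fun x => (PySem.List.enumerate routes_pool 0).foldl
        (fun inn pr => if x ∈ pr.2 then inn.insert pr.1 1 else inn)
        ((PySem.List.pyRange 0 (routes_pool.length : Int) 1).foldl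
          (fun inn pos => inn.insert pos 0) PySem.Dict.empty))
      = pvMk ((requests.foldl PySem.Set.add []).filter (fun _ => true)) (pvRow routes_pool) := by
    rw [List.filter_true]
    exact pvMk_congr _ _ _ (fun x _ => pv_rowFromZero routes_pool x)
  rw [hrow, pv_foldPop]
  congr 1
  congr 1
  congr 1
  apply List.filter_congr
  intro x hx
  have hxreq : x ∈ requests := (PySem.Set.mem_ofList requests x).1 hx
  have hcov : (x ∈ (PySem.List.enumerate routes_pool 0).foldl
      (fun C pr => pr.2.foldl (fun C req => if req ∈ requests.foldl PySem.Set.add [] then PySem.Set.add C req else C) C)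
      PySem.Set.empty) ↔ (pvCov routes_pool x = true) := by
    rw [pv_covAll]
    simp [PySem.Set.empty, hx, pvCov]
  by_cases hc : pvCov routes_pool x
  · have hmem := hcov.2 hc
    simp [hc, hxreq]
    exact hmem
  · have hnm := fun h => hc (hcov.1 h)
    simp [eq_false_of_ne_true hc, hxreq]
    exact hnm

-- ===== VERDICT (by name: the statement is the Claim_ definition above) =====
theorem get_request_in_route_dict_spec : Claim_equal_get_request_in_route_dict := by
  intro requests routes_pool _
  unfold Spec_get_request_in_route_dict
  exact pv_main requests routes_pool
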